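-- pv_equiv track=rewrite | github.com/palaj1/codepath-tip-102 | unit_4/s1/standard/v1/validate_nft_addition_p7.py | validate_nft_actions
-- ===== SOURCE A (Python) =====
-- def validate_nft_actions(actions):
--     stack = []
--
--     for action in actions:
--         if action == "add":
--             stack.append(action)
--         elif action == "remove":
--             if stack and stack[-1] == "add":
--                 stack.pop()
--             else:
--                 return False
--         else:
--             return False
--
--     return True
-- ===== SOURCE B (Python) =====
-- def _cancel_one(seq):
--     # Return seq with the FIRST adjacent ("add","remove") pair spliced out, or None if no such pair.
--     for i in range(len(seq) - 1):
--         if seq[i] == "add" and seq[i + 1] == "remove":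
--             return seq[:i] + seq[i + 2:]
--     return None
--
--
-- def validate_nft_actions(actions):
--     # Fixpoint rewriting: repeatedly cancel an adjacent add/remove pair.
--     # The sequence is valid iff the irreducible residue consists of "add"s only.
--     seq = list(actions)
--     while True:
--         nxt = _cancel_one(seq)
--         if nxt is None:
--             return all(t == "add" for t in seq)
--         seq = nxt
-- ===== Notes on version B (the rewrite author's own statement) =====
-- stated objective: alternative
-- what changed: Replaces the one-pass stack scan with fixpoint string rewriting: repeatedly splice out the first adjacent add-then-remove pair until none remains, then accept iff the irreducible residue contains only add tokens; this trades the linear scan for a quadratic reduction with no early returns.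
import Mathlib
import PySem

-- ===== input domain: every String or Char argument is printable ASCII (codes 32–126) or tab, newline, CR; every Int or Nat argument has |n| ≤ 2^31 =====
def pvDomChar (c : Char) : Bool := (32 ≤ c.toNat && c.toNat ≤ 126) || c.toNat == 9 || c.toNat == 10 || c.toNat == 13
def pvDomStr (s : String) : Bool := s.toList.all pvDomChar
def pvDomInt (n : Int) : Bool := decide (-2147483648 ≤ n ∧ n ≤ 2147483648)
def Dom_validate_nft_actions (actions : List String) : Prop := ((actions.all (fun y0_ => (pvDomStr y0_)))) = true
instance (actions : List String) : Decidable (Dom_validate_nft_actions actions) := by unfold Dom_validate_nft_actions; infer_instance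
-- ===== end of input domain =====

-- B replaces A's one-pass stack scan by fixpoint cancellation of adjacent add-then-remove pairs; same return value (alternative, not faster).
-- ===== PORT A =====
-- for-loop over actions with an explicit stack list (append at end, check/pop last) and early returns
def validate_nft_actions_go (stack : List String) (actions : List String) : Bool :=
  match actions with
  | [] => true
  | action :: rest =>
    if action == "add" then validate_nft_actions_go (stack ++ [action]) rest
    else if action == "remove" then
      if !stack.isEmpty && stack.getLast? == some "add" then
        validate_nft_actions_go stack.dropLast rest
      else false
    else false

def validate_nft_actions (actions : List String) : Bool :=
  validate_nft_actions_go [] actions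

-- ===== PORT B =====
-- Source B's _cancel_one: scan for the first adjacent add-then-remove pair; splice it out
def pvCancelOne : List String → Option (List String)
  | [] => none
  | [_] => none
  | a :: b :: rest =>
    if a == "add" && b == "remove" then some rest
    else (pvCancelOne (b :: rest)).map (a :: ·)

theorem pvCancelOne_lt : ∀ {seq s : List String}, pvCancelOne seq = some s → s.length < seq.length := by
  intro seq
  induction seq with
  | nil => intro s hs; simp [pvCancelOne] at hs
  | cons a rest ih =>
    intro s hs
    match rest, hs with
    | [], hs => simp [pvCancelOne] at hs
    | b :: rest', hs =>
      rw [pvCancelOne] at hs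
      split_ifs at hs with hp
      · cases hs; simp
      · rcases Option.map_eq_some_iff.mp hs with ⟨t, ht, rfl⟩
        have := ih ht
        simpa using Nat.succ_lt_succ this

-- Source B's while-loop: rewrite until no adjacent pair remains
def pvReduce (seq : List String) : List String :=
  match h : pvCancelOne seq with
  | none => seq
  | some s => pvReduce s
termination_by seq.length
decreasing_by exact pvCancelOne_lt h

def validate_nft_actions_alt (actions : List String) : Bool :=
  (pvReduce actions).all (fun t => t == "add")

-- ===== PRECONDITION & SPEC =====
def Spec_validate_nft_actions (actions : List String) (out : Bool) : Prop := out = validate_nft_actions_alt actions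
instance (actions : List String) (out : Bool) : Decidable (Spec_validate_nft_actions actions out) := by unfold Spec_validate_nft_actions; infer_instance

-- ===== CLAIM (what is proved, stated in full; the proofs are below) =====
def Claim_equal_validate_nft_actions : Prop := ∀ (actions : List String), Dom_validate_nft_actions actions → Spec_validate_nft_actions actions (validate_nft_actions actions)

-- ===== LEMMAS AND PROOFS =====

-- abstract state machine: process the sequence from depth d; none = rejected
def pvProc : Nat → List String → Option Nat
  | d, [] => some d
  | d, a :: rest =>
    if a == "add" then pvProc (d + 1) rest
    else if a == "remove" then (if d = 0 then none else pvProc (d - 1) rest)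
    else none

-- A computes pvProc-success
theorem pvA_char (rest : List String) : ∀ (stack : List String),
    (∀ x ∈ stack, x = "add") →
    validate_nft_actions_go stack rest = (pvProc stack.length rest).isSome := by
  induction rest with
  | nil => intro stack _; rfl
  | cons a rest ih =>
    intro stack hstack
    by_cases ha : a = "add"
    · subst ha
      simp only [validate_nft_actions_go, pvProc, beq_self_eq_true, if_true]
      have h' : ∀ x ∈ stack ++ ["add"], x = "add" := by
        intro x hx
        rcases List.mem_append.mp hx with h | h
        · exact hstack x h
        · simpa using h
      rw [ih _ h']
      simp
    · by_cases hr : a = "remove"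
      · subst hr
        simp only [validate_nft_actions_go, pvProc,
          show ("remove" == "add") = false by decide, Bool.false_eq_true, if_false, if_true,
          beq_self_eq_true]
        rcases List.eq_nil_or_concat stack with hnil | ⟨ys, y, hys⟩
        · subst hnil; simp
        · subst hys
          have hy : y = "add" := hstack y (by simp)
          subst hy
          rw [show (ys.concat "add").getLast? = some "add" by simp,
            show (ys.concat "add").isEmpty = false by simp,
            show (ys.concat "add").dropLast = ys by simp,
            show (ys.concat "add").length = ys.length + 1 by simp]
          simp only [Bool.not_false, Bool.true_and, beq_self_eq_true, if_true]
          rw [if_neg (by omega), Nat.add_sub_cancel]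
          exact ih ys (fun x hx => hstack x (by simp [hx]))
      · simp only [validate_nft_actions_go, pvProc,
          show (a == "add") = false by simpa using ha,
          show (a == "remove") = false by simpa using hr]
        simp

-- cancelling one adjacent pair does not change pvProc
theorem pvProc_cancel (seq : List String) : ∀ (s : List String) (d : Nat),
    pvCancelOne seq = some s → pvProc d seq = pvProc d s := by
  induction seq with
  | nil => intro s d h; simp [pvCancelOne] at h
  | cons a rest ih =>
    intro s d h
    match rest, h with
    | [], h => simp [pvCancelOne] at h
    | b :: rest', h =>
      rw [pvCancelOne] at h
      split_ifs at h with hp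
      · cases h
        rcases Bool.and_eq_true .. |>.mp hp with ⟨ha, hb⟩
        have ha' : a = "add" := by simpa using ha
        have hb' : b = "remove" := by simpa using hb
        subst ha'; subst hb'
        simp [pvProc]
      · rcases Option.map_eq_some_iff.mp h with ⟨t, ht, rfl⟩
        by_cases ha : a = "add"
        · subst ha
          simp only [pvProc, beq_self_eq_true, if_true]
          exact ih t (d + 1) ht
        · by_cases hr : a = "remove"
          · subst hr
            simp only [pvProc, show ("remove" == "add") = false by decide,
              Bool.false_eq_true, if_false, beq_self_eq_true, if_true]
            by_cases hd : d = 0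
            · simp [hd]
            · rw [if_neg hd, if_neg hd]
              exact ih t (d - 1) ht
          · simp [pvProc, show (a == "add") = false by simpa using ha,
              show (a == "remove") = false by simpa using hr]

-- the full reduction does not change pvProc
theorem pvProc_reduce (seq : List String) (d : Nat) : pvProc d (pvReduce seq) = pvProc d seq := by
  induction seq using pvReduce.induct with
  | case1 seq h => rw [pvReduce, h]
  | case2 seq s h ih =>
    rw [pvReduce, h]
    rw [ih, pvProc_cancel seq s d h]

-- the reduction reaches a pair-free fixpoint
theorem pvReduce_fix (seq : List String) : pvCancelOne (pvReduce seq) = none := by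
  induction seq using pvReduce.induct with
  | case1 seq h => rw [pvReduce, h]; exact h
  | case2 seq s h ih => rw [pvReduce, h]; exact ih

-- on a pair-free list whose head is not "remove", pvProc-success forces all-"add"
theorem pvM (seq : List String) : ∀ (d : Nat),
    pvCancelOne seq = none → seq.head? ≠ some "remove" →
    (pvProc d seq).isSome = true → seq.all (fun t => t == "add") = true := by
  induction seq with
  | nil => intro d _ _ _; rfl
  | cons a rest ih =>
    intro d hfix hhead hproc
    by_cases ha : a = "add"
    · subst ha
      simp only [pvProc, beq_self_eq_true, if_true] at hproc
      match rest, hfix, hproc with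
      | [], _, _ => rfl
      | b :: rest', hfix, hproc =>
        rw [pvCancelOne] at hfix
        split_ifs at hfix with hp
        have hfix' : pvCancelOne (b :: rest') = none := Option.map_eq_none_iff.mp hfix
        have hb : b ≠ "remove" := by
          intro hb; subst hb; exact hp (by simp)
        have hh : (b :: rest').head? ≠ some "remove" := by simpa using hb
        simpa using ih (d + 1) hfix' hh hproc
    · by_cases hr : a = "remove"
      · exact absurd (by simp [hr]) hhead
      · simp [pvProc, show (a == "add") = false by simpa using ha,
          show (a == "remove") = false by simpa using hr] at hproc

-- all-"add" lists always succeed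
theorem pvAllAdd (seq : List String) : ∀ (d : Nat),
    seq.all (fun t => t == "add") = true → (pvProc d seq).isSome = true := by
  induction seq with
  | nil => intro d _; rfl
  | cons a rest ih =>
    intro d hall
    simp only [List.all_cons, Bool.and_eq_true, beq_iff_eq] at hall
    rw [pvProc, if_pos (by simp [hall.1])]
    exact ih (d + 1) (by simpa using hall.2)

-- on a pair-free list, 0-success and all-"add" coincide
theorem pvFix_char (seq : List String) (hfix : pvCancelOne seq = none) :
    (pvProc 0 seq).isSome = seq.all (fun t => t == "add") := by
  by_cases hp : (pvProc 0 seq).isSome = true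
  · rw [hp]
    by_cases hhead : seq.head? = some "remove"
    · exfalso
      match seq, hhead, hp with
      | a :: rest, hhead, hp =>
        have ha : a = "remove" := by simpa using hhead
        subst ha
        simp [pvProc] at hp
    · exact (pvM seq 0 hfix hhead hp).symm
  · rw [Bool.eq_false_iff.mpr hp]
    by_cases hall : seq.all (fun t => t == "add") = true
    · exact absurd (pvAllAdd seq 0 hall) hp
    · exact (Bool.eq_false_iff.mpr hall).symm

-- ===== VERDICT (by name: the statement is the Claim_ definition above) =====
theorem validate_nft_actions_spec : Claim_equal_validate_nft_actions := by
  intro actions _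
  unfold Spec_validate_nft_actions validate_nft_actions validate_nft_actions_alt
  rw [pvA_char actions [] (by simp), List.length_nil,
    ← pvProc_reduce actions 0, pvFix_char (pvReduce actions) (pvReduce_fix actions)]
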